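-- pv_equiv track=rewrite | github.com/ilante/programming_immanuela_englander | simple_exercises/ev_odd.py | ev_odd
-- ===== SOURCE A (Python) =====
-- def ev_odd(st):
--     odd = 0
--     ev = 0
--     for i in range(len(st)):
--         if i%2 == 0 and st[i] == 'A':
--             ev += 1
--         elif i%2 != 0 and st[i] == 'A':
--                 odd += 1
--     if odd == ev:
--         return True
--     return False
-- ===== SOURCE B (Python) =====
-- def ev_odd(st):
--     ev = []
--     od = []
--     for i in range(0, len(st), 2):
--         ev.append(st[i])
--         if i + 1 < len(st):
--             od.append(st[i + 1])
--     return ev.count('A') == od.count('A')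
-- ===== Notes on version B (the rewrite author's own statement) =====
-- stated objective: alternative
-- what changed: Replaces the single index-parity loop with two counters by a step-2 deinterleave that materialises the even-position and odd-position subsequences and then compares their target-character counts obtained with the library list.count.
import Mathlib
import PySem

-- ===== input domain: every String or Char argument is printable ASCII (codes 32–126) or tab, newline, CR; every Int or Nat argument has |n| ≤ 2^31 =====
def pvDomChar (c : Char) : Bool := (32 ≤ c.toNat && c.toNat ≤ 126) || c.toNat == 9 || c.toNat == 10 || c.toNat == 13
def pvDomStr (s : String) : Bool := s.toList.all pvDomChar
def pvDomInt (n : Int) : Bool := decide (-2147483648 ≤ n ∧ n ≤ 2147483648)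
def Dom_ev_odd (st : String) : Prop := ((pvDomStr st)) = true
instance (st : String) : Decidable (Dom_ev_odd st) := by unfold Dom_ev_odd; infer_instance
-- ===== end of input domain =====

-- B replaces A's index-parity loop by a step-2 deinterleave that materialises the
-- even-position and odd-position subsequences, then compares their 'A'-counts.
-- Objective: alternative decomposition (staged passes over derived subsequences).

-- ===== PORT A =====
-- loop state p = (odd, ev); i%2 via PySem.Int.mod, st[i] via PySem.List.pyGet?
def ev_odd (st : String) : Bool :=
  if ((PySem.List.pyRange 0 (st.toList.length : Int) 1).foldl
        (fun (p : Int × Int) i =>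
          if PySem.Int.mod i 2 == 0 && PySem.List.pyGet? st.toList i == some 'A' then
            (p.1, p.2 + 1)
          else if PySem.Int.mod i 2 != 0 && PySem.List.pyGet? st.toList i == some 'A' then
            (p.1 + 1, p.2)
          else p)
        ((0 : Int), (0 : Int))).1
      == ((PySem.List.pyRange 0 (st.toList.length : Int) 1).foldl
        (fun (p : Int × Int) i =>
          if PySem.Int.mod i 2 == 0 && PySem.List.pyGet? st.toList i == some 'A' then
            (p.1, p.2 + 1)
          else if PySem.Int.mod i 2 != 0 && PySem.List.pyGet? st.toList i == some 'A' then
            (p.1 + 1, p.2)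
          else p)
        ((0 : Int), (0 : Int))).2
  then true else false


-- ===== PORT B =====
-- for i in range(0, len(st), 2): collect st[i] into ev and, if i+1 < len, st[i+1] into od;
-- then compare ev.count('A') with od.count('A').  st[i] via pyGetD (index always in range).
def ev_odd_alt (st : String) : Bool :=
  ((PySem.List.pyRange 0 (st.toList.length : Int) 2).foldl
      (fun (q : List Char × List Char) i =>
        (q.1 ++ [PySem.List.pyGetD st.toList i ' '],
         if i + 1 < (st.toList.length : Int) then q.2 ++ [PySem.List.pyGetD st.toList (i + 1) ' ']
         else q.2))
      ([], [])).1.count 'A'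
  == ((PySem.List.pyRange 0 (st.toList.length : Int) 2).foldl
      (fun (q : List Char × List Char) i =>
        (q.1 ++ [PySem.List.pyGetD st.toList i ' '],
         if i + 1 < (st.toList.length : Int) then q.2 ++ [PySem.List.pyGetD st.toList (i + 1) ' ']
         else q.2))
      ([], [])).2.count 'A'

-- ===== PRECONDITION & SPEC =====
def Spec_ev_odd (st : String) (out : Bool) : Prop := out = ev_odd_alt st
instance (st : String) (out : Bool) : Decidable (Spec_ev_odd st out) := by unfold Spec_ev_odd; infer_instance

-- ===== CLAIM (what is proved, stated in full; the proofs are below) =====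
def Claim_equal_ev_odd : Prop := ∀ (st : String), Dom_ev_odd st → Spec_ev_odd st (ev_odd st)

-- ===== LEMMAS AND PROOFS =====

-- even-position / odd-position subsequences (proof-side helper)
def pvSplit : List Char → List Char × List Char
  | [] => ([], [])
  | [c] => ([c], [])
  | c :: d :: r => (c :: (pvSplit r).1, d :: (pvSplit r).2)

-- accumulating form of the deinterleave; mirrors B's loop body
def pvGo : List Char → List Char × List Char → List Char × List Char
  | [], acc => acc
  | [c], acc => (acc.1 ++ [c], acc.2)
  | c :: d :: r, acc => pvGo r (acc.1 ++ [c], acc.2 ++ [d])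

-- step-2 range: cons and nil forms
theorem pvRange2_cons (a b : Int) (h : a < b) :
    PySem.List.pyRange a b 2 = a :: PySem.List.pyRange (a + 2) b 2 := by
  rw [PySem.List.pyRange_of_pos a b (by norm_num), PySem.List.pyRange_of_pos (a + 2) b (by norm_num)]
  have hc : (if a < b then ((b - a + 2 - 1) / 2).toNat else 0)
      = (if a + 2 < b then ((b - (a + 2) + 2 - 1) / 2).toNat else 0) + 1 := by
    split_ifs <;> omega
  rw [hc, List.range_succ_eq_map, List.map_cons, List.map_map]
  refine congrArg₂ _ (by simp) ?_
  simp only [List.map_inj_left, Function.comp_apply]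
  intro k _; push_cast; ring

theorem pvRange2_nil (a b : Int) (h : b ≤ a) : PySem.List.pyRange a b 2 = [] := by
  rw [PySem.List.pyRange_of_pos a b (by norm_num)]
  have : ¬ a < b := by omega
  simp [this]

-- B's fold over range(j, len, 2) is pvGo on the suffix from j
theorem pvB_loop (l : List Char) (n : Nat) : ∀ (j : Nat) (acc : List Char × List Char),
    l.length - j ≤ n →
    (PySem.List.pyRange (j : Int) (l.length : Int) 2).foldl
      (fun (q : List Char × List Char) i =>
        (q.1 ++ [PySem.List.pyGetD l i ' '],
         if i + 1 < (l.length : Int) then q.2 ++ [PySem.List.pyGetD l (i + 1) ' '] else q.2))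
      acc
    = pvGo (l.drop j) acc := by
  induction n with
  | zero =>
    intro j acc h
    have hj : l.length ≤ j := by omega
    rw [pvRange2_nil _ _ (by exact_mod_cast hj), List.drop_of_length_le hj]
    simp [pvGo]
  | succ n ih =>
    intro j acc h
    by_cases hj : j < l.length
    · rw [pvRange2_cons _ _ (by exact_mod_cast hj), List.foldl_cons]
      have hg : PySem.List.pyGetD l (j : Int) ' ' = l[j] := by
        rw [PySem.List.pyGetD_natCast]
        simp [List.getD, List.getElem?_eq_getElem hj]
      by_cases hj1 : j + 1 < l.length
      · have hg1 : PySem.List.pyGetD l ((j : Int) + 1) ' ' = l[j + 1] := by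
          have : (j : Int) + 1 = ((j + 1 : Nat) : Int) := by push_cast; ring
          rw [this, PySem.List.pyGetD_natCast]
          simp [List.getD, List.getElem?_eq_getElem hj1]
        have hcond : ((j : Int) + 1 < (l.length : Int)) := by exact_mod_cast hj1
        have hdrop : l.drop j = l[j] :: l[j + 1] :: l.drop (j + 2) := by
          rw [List.drop_eq_getElem_cons hj, List.drop_eq_getElem_cons hj1]
        have hcast : (j : Int) + 2 = ((j + 2 : Nat) : Int) := by push_cast; ring
        rw [hg, if_pos hcond, hg1, hcast, ih (j + 2) _ (by omega), hdrop]
        rfl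
      · have hlen : l.length = j + 1 := by omega
        have hcond : ¬ ((j : Int) + 1 < (l.length : Int)) := by
          rw [hlen]; push_cast; omega
        have hdrop : l.drop j = [l[j]] := by
          rw [List.drop_eq_getElem_cons hj]
          congr 1
          rw [List.drop_of_length_le (by omega)]
        rw [hg, if_neg hcond, pvRange2_nil _ _ (by rw [hlen]; push_cast; omega)]
        rw [hdrop]
        rfl
    · have hj' : l.length ≤ j := by omega
      rw [pvRange2_nil _ _ (by exact_mod_cast hj'), List.drop_of_length_le hj']
      simp [pvGo]

-- pvGo accumulates exactly pvSplit
theorem pvGo_split (l : List Char) : ∀ (acc : List Char × List Char),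
    pvGo l acc = (acc.1 ++ (pvSplit l).1, acc.2 ++ (pvSplit l).2) := by
  induction l using pvSplit.induct with
  | case1 => intro acc; simp [pvGo, pvSplit]
  | case2 c => intro acc; simp [pvGo, pvSplit]
  | case3 c d r ih => intro acc; simp [pvGo, pvSplit, ih]

-- (count of 'A' at even positions, count at odd positions), positions from the head
def pvCnt : List Char → Int × Int
  | [] => (0, 0)
  | c :: r => ((pvCnt r).2 + (if c = 'A' then 1 else 0), (pvCnt r).1)

-- B's deinterleave yields exactly the even- and odd-position 'A' counts
theorem pvSplit_count (l : List Char) :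
    ((pvSplit l).1.count 'A' : Int) = (pvCnt l).1 ∧
    ((pvSplit l).2.count 'A' : Int) = (pvCnt l).2 := by
  induction l using pvSplit.induct with
  | case1 => simp [pvSplit, pvCnt]
  | case2 c => by_cases hc : c = 'A' <;> simp [pvSplit, pvCnt, hc]
  | case3 c d r ih =>
    obtain ⟨h1, h2⟩ := ih
    by_cases hc : c = 'A' <;> by_cases hd : d = 'A' <;>
      simp [pvSplit, pvCnt, hc, hd, h1, h2]

-- A's loop, rephrased over enumerate, adds the two counts to its accumulator,
-- swapped when the start index is odd
theorem pvA_fold (l : List Char) (s : Int) (odd ev : Int) (hs : 0 ≤ s) :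
    (PySem.List.enumerate l s).foldl
      (fun (p : Int × Int) q =>
        if PySem.Int.mod q.1 2 == 0 && q.2 == 'A' then (p.1, p.2 + 1)
        else if PySem.Int.mod q.1 2 != 0 && q.2 == 'A' then (p.1 + 1, p.2)
        else p)
      (odd, ev)
    = (if s % 2 = 0 then (odd + (pvCnt l).2, ev + (pvCnt l).1)
       else (odd + (pvCnt l).1, ev + (pvCnt l).2)) := by
  induction l generalizing s odd ev with
  | nil => simp [PySem.List.enumerate_nil, pvCnt]
  | cons c r ih =>
    rw [PySem.List.enumerate_cons]
    set f := (fun (p : Int × Int) (q : Int × Char) =>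
        if PySem.Int.mod q.1 2 == 0 && q.2 == 'A' then (p.1, p.2 + 1)
        else if PySem.Int.mod q.1 2 != 0 && q.2 == 'A' then (p.1 + 1, p.2)
        else p) with hf
    rw [List.foldl_cons]
    have hmod : PySem.Int.mod s 2 = s % 2 := by
      show s.fmod 2 = s % 2
      rw [Int.fmod_eq_emod]; simp
    have hs1 : (0:Int) ≤ s + 1 := by omega
    by_cases hp : s % 2 = 0
    · have hp1 : ¬ ((s + 1) % 2 = 0) := by omega
      by_cases hc : c = 'A'
      · have hstep : f (odd, ev) (s, c) = (odd, ev + 1) := by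
          rw [hf]; simp [hp, hc]
        rw [hstep, ih (s+1) _ _ hs1]
        simp [hp, hp1, pvCnt, hc, Prod.mk.injEq]; omega
      · have hstep : f (odd, ev) (s, c) = (odd, ev) := by
          rw [hf]; simp [hp, hc]
        rw [hstep, ih (s+1) _ _ hs1]
        simp [hp, hp1, pvCnt, hc]
    · have hp1 : (s + 1) % 2 = 0 := by omega
      by_cases hc : c = 'A'
      · have hstep : f (odd, ev) (s, c) = (odd + 1, ev) := by
          rw [hf]; simp [hp, hc]
        rw [hstep, ih (s+1) _ _ hs1]
        simp [hp, hp1, pvCnt, hc, Prod.mk.injEq]; omega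
      · have hstep : f (odd, ev) (s, c) = (odd, ev) := by
          rw [hf]; simp [hp, hc]
        rw [hstep, ih (s+1) _ _ hs1]
        simp [hp, hp1, pvCnt, hc]


-- ===== VERDICT (by name: the statement is the Claim_ definition above) =====
theorem ev_odd_spec : Claim_equal_ev_odd := by
  intro st _
  unfold Spec_ev_odd ev_odd ev_odd_alt
  have hbridge :
      ∀ (init : Int × Int),
      (PySem.List.pyRange 0 (st.toList.length : Int) 1).foldl
        (fun (p : Int × Int) i =>
          if PySem.Int.mod i 2 == 0 && PySem.List.pyGet? st.toList i == some 'A' then (p.1, p.2 + 1)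
          else if PySem.Int.mod i 2 != 0 && PySem.List.pyGet? st.toList i == some 'A' then (p.1 + 1, p.2)
          else p)
        init
      = (PySem.List.enumerate st.toList 0).foldl
          (fun (p : Int × Int) q =>
            if PySem.Int.mod q.1 2 == 0 && q.2 == 'A' then (p.1, p.2 + 1)
            else if PySem.Int.mod q.1 2 != 0 && q.2 == 'A' then (p.1 + 1, p.2)
            else p)
          init := by
    intro init
    rw [PySem.List.enumerate_eq_map_pyRange (d := 'A'), List.foldl_map]
    show List.foldl _ init (PySem.List.pyRange 0 (st.toList.length : Int) 1)
       = List.foldl _ init (PySem.List.pyRange 0 (PySem.List.len st.toList) 1)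
    apply PySem.List.foldl_congr_mem
    intro p i hi
    have hmem := (PySem.List.mem_pyRange_one (a := 0) (b := (st.toList.length : Int)) (x := i)).mp hi
    obtain ⟨k, rfl, hklt⟩ : ∃ k : Nat, i = (k : Int) ∧ k < st.toList.length :=
      ⟨i.toNat, by omega, by omega⟩
    rw [PySem.List.pyGet?_natCast, PySem.List.pyGetD_natCast,
        List.getElem?_eq_getElem hklt]
    simp [List.getD, List.getElem?_eq_getElem hklt]
  rw [hbridge, pvA_fold st.toList 0 0 0 le_rfl]
  have hB : ∀ (acc : List Char × List Char),
      (PySem.List.pyRange 0 (st.toList.length : Int) 2).foldl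
        (fun (q : List Char × List Char) i =>
          (q.1 ++ [PySem.List.pyGetD st.toList i ' '],
           if i + 1 < (st.toList.length : Int) then q.2 ++ [PySem.List.pyGetD st.toList (i + 1) ' ']
           else q.2))
        acc
      = pvGo st.toList acc := by
    intro acc
    have := pvB_loop st.toList st.toList.length 0 acc (by omega)
    simpa using this
  rw [hB, pvGo_split]
  obtain ⟨h1, h2⟩ := pvSplit_count st.toList
  simp only [Int.zero_add, List.nil_append]
  by_cases h : (pvSplit st.toList).1.count 'A' = (pvSplit st.toList).2.count 'A'
  · have he : (pvCnt st.toList).2 = (pvCnt st.toList).1 := by omega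
    simp [h, he]
  · have he : ¬ ((pvCnt st.toList).2 = (pvCnt st.toList).1) := by omega
    simp [h, he]
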